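-- pv_equiv track=rewrite | github.com/TheDarkLightX/Formal_Methods_Philosophy | experiments/math_object_innovation_v51/run_cycle.py | semantic_script
-- ===== SOURCE A (Python) =====
-- def parse_formula(formula: str):
--     literals = {}
--     for literal in formula.split(" and "):
--         negative = literal.startswith("not ")
--         feature = literal[4:] if negative else literal
--         literals[feature] = not negative
--     return literals
--
-- def feature_kind(feature: str):
--     if " AND " in feature:
--         return f"AND{feature.count(' AND ') + 1}"
--     if " OR " in feature:
--         return f"OR{feature.count(' OR ') + 1}"
--     return "ATOM"
--
-- def semantic_script(core_formula: str, patch_formula: str):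
--     core = parse_formula(core_formula)
--     patch = parse_formula(patch_formula)
--     ops = []
--     families = set()
--
--     for feature in sorted(set(core) | set(patch)):
--         in_core = feature in core
--         in_patch = feature in patch
--         if in_core and in_patch:
--             if core[feature] == patch[feature]:
--                 continue
--             ops.append(
--                 {
--                     "family": "FLIP_SIGN",
--                     "kind": feature_kind(feature),
--                     "feature": feature,
--                     "from_sign": "POS" if core[feature] else "NEG",
--                     "to_sign": "POS" if patch[feature] else "NEG",
--                 }
--             )
--             families.add("FLIP_SIGN")
--         elif in_patch:
--             ops.append(
--                 {
--                     "family": "ADD_LITERAL",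
--                     "kind": feature_kind(feature),
--                     "feature": feature,
--                     "sign": "POS" if patch[feature] else "NEG",
--                 }
--             )
--             families.add("ADD_LITERAL")
--         else:
--             ops.append(
--                 {
--                     "family": "DROP_LITERAL",
--                     "kind": feature_kind(feature),
--                     "feature": feature,
--                     "sign": "POS" if core[feature] else "NEG",
--                 }
--             )
--             families.add("DROP_LITERAL")
--
--     return tuple(sorted(families)), ops
-- ===== SOURCE B (Python) =====
-- def parse_formula(formula: str):
--     literals = {}
--     for literal in formula.split(" and "):
--         negative = literal.startswith("not ")
--         feature = literal[4:] if negative else literal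
--         literals[feature] = not negative
--     return literals
--
-- def feature_kind(feature: str):
--     if " AND " in feature:
--         return f"AND{feature.count(' AND ') + 1}"
--     if " OR " in feature:
--         return f"OR{feature.count(' OR ') + 1}"
--     return "ATOM"
--
-- def semantic_script(core_formula: str, patch_formula: str):
--     core = parse_formula(core_formula)
--     patch = parse_formula(patch_formula)
--
--     add_ops = [
--         {"family": "ADD_LITERAL", "kind": feature_kind(f), "feature": f,
--          "sign": "POS" if patch[f] else "NEG"}
--         for f in patch if f not in core
--     ]
--     drop_ops = [
--         {"family": "DROP_LITERAL", "kind": feature_kind(f), "feature": f,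
--          "sign": "POS" if core[f] else "NEG"}
--         for f in core if f not in patch
--     ]
--     flip_ops = [
--         {"family": "FLIP_SIGN", "kind": feature_kind(f), "feature": f,
--          "from_sign": "POS" if core[f] else "NEG",
--          "to_sign": "POS" if patch[f] else "NEG"}
--         for f in core if f in patch and core[f] != patch[f]
--     ]
--
--     families = []
--     if add_ops:
--         families.append("ADD_LITERAL")
--     if drop_ops:
--         families.append("DROP_LITERAL")
--     if flip_ops:
--         families.append("FLIP_SIGN")
--
--     ops = sorted(add_ops + drop_ops + flip_ops, key=lambda op: op["feature"])
--     return tuple(families), ops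
-- ===== Notes on version B (the rewrite author's own statement) =====
-- stated objective: alternative
-- what changed: Instead of walking the sorted key union with a pair accumulator and classifying each key inside the loop, B builds the ADD/DROP/FLIP op groups by three independent dict comprehensions, derives the families list directly from which groups are nonempty, and obtains the final op order by one sort of the combined list on the unique 'feature' key.
import Mathlib
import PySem

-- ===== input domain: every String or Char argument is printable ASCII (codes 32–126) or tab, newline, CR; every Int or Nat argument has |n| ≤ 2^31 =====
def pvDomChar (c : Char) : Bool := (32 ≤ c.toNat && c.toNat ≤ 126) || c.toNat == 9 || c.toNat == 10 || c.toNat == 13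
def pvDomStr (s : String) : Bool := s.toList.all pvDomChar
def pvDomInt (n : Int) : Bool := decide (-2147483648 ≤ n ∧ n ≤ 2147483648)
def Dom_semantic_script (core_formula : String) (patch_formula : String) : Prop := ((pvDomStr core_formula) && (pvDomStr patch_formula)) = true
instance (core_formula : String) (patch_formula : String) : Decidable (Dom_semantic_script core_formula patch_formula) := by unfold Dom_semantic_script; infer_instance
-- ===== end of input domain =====

-- B replaces A's single walk over the sorted key union (pair accumulator, per-key classification)
-- by three independent per-group passes over the dicts' key lists, a families list read off from
-- which groups are nonempty, and one final sort of the combined ops on the unique 'feature' key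
-- (objective: alternative decomposition, same cost).

-- ===== PORT A =====
-- shared helpers: parse_formula and feature_kind are the SAME Python function in A and B
def pvParseFormula (formula : String) : PySem.Dict String Bool :=
  ((PySem.Str.split? formula " and ").getD []).foldl
    (fun literals literal =>
      literals.insert
        (if PySem.Str.startswith literal "not " then PySem.Str.slice literal (some 4) none
         else literal)
        (!PySem.Str.startswith literal "not "))
    PySem.Dict.empty

def pvFeatureKind (feature : String) : String :=
  if PySem.Str.isIn " AND " feature then
    "AND" ++ PySem.Int.toStr ((PySem.Str.count feature " AND " : Int) + 1)
  else if PySem.Str.isIn " OR " feature then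
    "OR" ++ PySem.Int.toStr ((PySem.Str.count feature " OR " : Int) + 1)
  else "ATOM"

-- the three op dicts (literal dicts in insertion order; identical text in A and B)
def pvFlipOp (core patch : PySem.Dict String Bool) (feature : String) : List (String × String) :=
  [("family", "FLIP_SIGN"), ("kind", pvFeatureKind feature), ("feature", feature),
   ("from_sign", if core.getD feature false then "POS" else "NEG"),
   ("to_sign", if patch.getD feature false then "POS" else "NEG")]

def pvAddOp (patch : PySem.Dict String Bool) (feature : String) : List (String × String) :=
  [("family", "ADD_LITERAL"), ("kind", pvFeatureKind feature), ("feature", feature),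
   ("sign", if patch.getD feature false then "POS" else "NEG")]

def pvDropOp (core : PySem.Dict String Bool) (feature : String) : List (String × String) :=
  [("family", "DROP_LITERAL"), ("kind", pvFeatureKind feature), ("feature", feature),
   ("sign", if core.getD feature false then "POS" else "NEG")]

-- A's loop body: extend (ops, families) by the classification of one feature
def pvStepA (core patch : PySem.Dict String Bool)
    (acc : List (List (String × String)) × PySem.Set String) (feature : String) :
    List (List (String × String)) × PySem.Set String :=
  if core.contains feature && patch.contains feature then
    if core.getD feature false == patch.getD feature false then acc
    else (acc.1 ++ [pvFlipOp core patch feature], PySem.Set.add acc.2 "FLIP_SIGN")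
  else if patch.contains feature then
    (acc.1 ++ [pvAddOp patch feature], PySem.Set.add acc.2 "ADD_LITERAL")
  else
    (acc.1 ++ [pvDropOp core feature], PySem.Set.add acc.2 "DROP_LITERAL")

def semantic_script (core_formula : String) (patch_formula : String) :
    List String × (List (List (String × String))) :=
  let core := pvParseFormula core_formula
  let patch := pvParseFormula patch_formula
  let res :=
    (PySem.List.sorted (PySem.Set.union (PySem.Set.ofList core.keys) patch.keys)
        (fun x => x) false).foldl
      (pvStepA core patch) ([], PySem.Set.empty)
  (PySem.List.sorted res.2 (fun x => x) false, res.1)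

-- ===== PORT B =====
def semantic_script_alt (core_formula : String) (patch_formula : String) :
    List String × (List (List (String × String))) :=
  let core := pvParseFormula core_formula
  let patch := pvParseFormula patch_formula
  let add_ops := (patch.keys.filter (fun f => !core.contains f)).map (pvAddOp patch)
  let drop_ops := (core.keys.filter (fun f => !patch.contains f)).map (pvDropOp core)
  let flip_ops :=
    (core.keys.filter (fun f =>
        patch.contains f && !(core.getD f false == patch.getD f false))).map
      (pvFlipOp core patch)
  let families :=
    (if add_ops.isEmpty then [] else ["ADD_LITERAL"]) ++
    (if drop_ops.isEmpty then [] else ["DROP_LITERAL"]) ++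
    (if flip_ops.isEmpty then [] else ["FLIP_SIGN"])
  (families,
   PySem.List.sorted (add_ops ++ drop_ops ++ flip_ops)
     (fun op => (PySem.Dict.mk op).getD "feature" "") false)

-- ===== PRECONDITION & SPEC =====
def Spec_semantic_script (core_formula : String) (patch_formula : String) (out : List String × (List (List (String × String)))) : Prop := out = semantic_script_alt core_formula patch_formula
instance (core_formula : String) (patch_formula : String) (out : List String × (List (List (String × String)))) : Decidable (Spec_semantic_script core_formula patch_formula out) := by unfold Spec_semantic_script; infer_instance

-- ===== CLAIM (what is proved, stated in full; the proofs are below) =====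
def Claim_equal_semantic_script : Prop := ∀ (core_formula : String) (patch_formula : String), Dom_semantic_script core_formula patch_formula → Spec_semantic_script core_formula patch_formula (semantic_script core_formula patch_formula)

-- ===== LEMMAS AND PROOFS =====

-- classification of one feature, as A's loop applies it: the op it emits and its family
def pvClassify (core patch : PySem.Dict String Bool) (f : String) :
    Option (List (String × String) × String) :=
  if core.contains f && patch.contains f then
    if core.getD f false == patch.getD f false then none
    else some (pvFlipOp core patch f, "FLIP_SIGN")
  else if patch.contains f then some (pvAddOp patch f, "ADD_LITERAL")
  else some (pvDropOp core f, "DROP_LITERAL")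

def pvOpOf (core patch : PySem.Dict String Bool) (f : String) :
    Option (List (String × String)) :=
  (pvClassify core patch f).map Prod.fst

def pvFamOf (core patch : PySem.Dict String Bool) (f : String) : Option String :=
  (pvClassify core patch f).map Prod.snd

theorem pvStepA_eq (core patch : PySem.Dict String Bool)
    (acc : List (List (String × String)) × PySem.Set String) (f : String) :
    pvStepA core patch acc f =
      match pvClassify core patch f with
      | none => acc
      | some (o, x) => (acc.1 ++ [o], PySem.Set.add acc.2 x) := by
  unfold pvStepA pvClassify
  split_ifs <;> rfl

theorem pvFoldA (core patch : PySem.Dict String Bool) (S : List String)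
    (ops0 : List (List (String × String))) (fams0 : PySem.Set String) :
    S.foldl (pvStepA core patch) (ops0, fams0) =
      (ops0 ++ S.filterMap (pvOpOf core patch),
       (S.filterMap (pvFamOf core patch)).foldl PySem.Set.add fams0) := by
  induction S generalizing ops0 fams0 with
  | nil => simp
  | cons f S ih =>
    rw [List.foldl_cons, pvStepA_eq]
    cases hcl : pvClassify core patch f with
    | none =>
      have h1 : pvOpOf core patch f = none := by simp [pvOpOf, hcl]
      have h2 : pvFamOf core patch f = none := by simp [pvFamOf, hcl]
      simp only [List.filterMap_cons, h1, h2]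
      exact ih ops0 fams0
    | some pr =>
      obtain ⟨o, x⟩ := pr
      have h1 : pvOpOf core patch f = some o := by simp [pvOpOf, hcl]
      have h2 : pvFamOf core patch f = some x := by simp [pvFamOf, hcl]
      simp only [List.filterMap_cons, h1, h2, List.foldl_cons]
      rw [ih]
      simp

theorem pvKeyOp (core patch : PySem.Dict String Bool) (f : String)
    (o : List (String × String)) (h : pvOpOf core patch f = some o) :
    (PySem.Dict.mk o).getD "feature" "" = f := by
  unfold pvOpOf pvClassify at h
  split_ifs at h <;>
    simp only [Option.map_eq_some_iff, Option.some.injEq] at h <;>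
    obtain ⟨pr, hpr, rfl⟩ := h <;>
    cases hpr <;>
    simp [pvFlipOp, pvAddOp, pvDropOp,
      PySem.Dict.getD_eq_get?_getD, PySem.Dict.get?_mk_cons]

-- filterMap of an if-some-else-none classifier is filter-then-map
theorem pvFilterMap_ite {α β : Type} (l : List α) (q : α → Bool) (g : α → β) :
    l.filterMap (fun x => if q x then some (g x) else none) =
      (l.filter q).map g := by
  induction l with
  | nil => rfl
  | cons x l ih => by_cases h : q x <;> simp [h, ih]

theorem pvFamOf_add_iff (core patch : PySem.Dict String Bool) (f : String) :
    pvFamOf core patch f = some "ADD_LITERAL" ↔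
      core.contains f = false ∧ patch.contains f = true := by
  unfold pvFamOf pvClassify
  split_ifs <;> simp_all

theorem pvFamOf_drop_iff (core patch : PySem.Dict String Bool) (f : String) :
    pvFamOf core patch f = some "DROP_LITERAL" ↔ patch.contains f = false := by
  unfold pvFamOf pvClassify
  split_ifs <;> simp_all

theorem pvFamOf_flip_iff (core patch : PySem.Dict String Bool) (f : String) :
    pvFamOf core patch f = some "FLIP_SIGN" ↔
      core.contains f = true ∧ patch.contains f = true ∧
        ¬(core.getD f false == patch.getD f false) = true := by
  unfold pvFamOf pvClassify
  split_ifs <;> simp_all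

theorem pvFamOf_range (core patch : PySem.Dict String Bool) (f : String) (x : String)
    (h : pvFamOf core patch f = some x) :
    x = "FLIP_SIGN" ∨ x = "ADD_LITERAL" ∨ x = "DROP_LITERAL" := by
  unfold pvFamOf pvClassify at h
  split_ifs at h <;> simp_all

theorem pvMem_ite {α β : Type} (l : List α) (s a : β)
    (h : a ∈ (if l.isEmpty then ([] : List β) else [s])) : a = s ∧ l ≠ [] := by
  by_cases hc : l.isEmpty = true
  · simp [hc] at h
  · simp [hc] at h
    exact ⟨h, fun hl => hc (List.isEmpty_iff.mpr hl)⟩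

theorem pvMem_ite_intro {α β : Type} (l : List α) (s : β) (hne : l ≠ []) :
    s ∈ (if l.isEmpty then ([] : List β) else [s]) := by
  rw [if_neg (fun h => hne (List.isEmpty_iff.mp h))]
  exact List.mem_singleton_self s

theorem pvMain (core patch : PySem.Dict String Bool)
    (hc : core.keys.Nodup) (hp : patch.keys.Nodup) :
    ((PySem.List.sorted
        ((PySem.List.sorted (PySem.Set.union (PySem.Set.ofList core.keys) patch.keys)
            (fun x => x) false).foldl (pvStepA core patch) ([], PySem.Set.empty)).2
        (fun x => x) false,
      ((PySem.List.sorted (PySem.Set.union (PySem.Set.ofList core.keys) patch.keys)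
            (fun x => x) false).foldl (pvStepA core patch) ([], PySem.Set.empty)).1) :
      List String × (List (List (String × String)))) =
    ((if ((patch.keys.filter (fun f => !core.contains f)).map (pvAddOp patch)).isEmpty
        then [] else ["ADD_LITERAL"]) ++
     (if ((core.keys.filter (fun f => !patch.contains f)).map (pvDropOp core)).isEmpty
        then [] else ["DROP_LITERAL"]) ++
     (if ((core.keys.filter (fun f =>
            patch.contains f && !(core.getD f false == patch.getD f false))).map
              (pvFlipOp core patch)).isEmpty
        then [] else ["FLIP_SIGN"]),
     PySem.List.sorted
       (((patch.keys.filter (fun f => !core.contains f)).map (pvAddOp patch) ++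
         (core.keys.filter (fun f => !patch.contains f)).map (pvDropOp core)) ++
         (core.keys.filter (fun f =>
            patch.contains f && !(core.getD f false == patch.getD f false))).map
              (pvFlipOp core patch))
       (fun op => (PySem.Dict.mk op).getD "feature" "") false) := by
  rw [pvFoldA]
  have hcontains : ∀ f, PySem.Set.contains core.keys f = core.contains f := by
    intro f
    rw [Bool.eq_iff_iff, PySem.Set.contains_iff, PySem.Dict.contains_iff_mem_keys]
  have hUeq : PySem.Set.union (PySem.Set.ofList core.keys) patch.keys
      = core.keys ++ patch.keys.filter (fun f => !core.contains f) := by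
    show PySem.Set.update _ _ = _
    rw [PySem.Set.update_eq_append_filter, PySem.Set.ofList_eq_self_of_nodup _ hc,
      PySem.Set.ofList_eq_self_of_nodup _ hp]
    exact congrArg _ (List.filter_congr (fun x _ => by rw [hcontains]))
  have hUnodup : (PySem.Set.union (PySem.Set.ofList core.keys) patch.keys).Nodup :=
    PySem.Set.nodup_union _ _ (PySem.Set.nodup_ofList _)
  have hSnodup : (PySem.List.sorted (PySem.Set.union (PySem.Set.ofList core.keys) patch.keys)
      (fun x => x) false).Nodup :=
    (PySem.List.sorted_perm _ _ _).nodup_iff.mpr hUnodup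
  have hmemS : ∀ f : String,
      f ∈ PySem.List.sorted (PySem.Set.union (PySem.Set.ofList core.keys) patch.keys)
        (fun x => x) false ↔ f ∈ core.keys ∨ f ∈ patch.keys := by
    intro f
    rw [PySem.List.mem_sorted, PySem.Set.mem_union, PySem.Set.mem_ofList]
  have hSlt : (PySem.List.sorted (PySem.Set.union (PySem.Set.ofList core.keys) patch.keys)
      (fun x => x) false).Pairwise (fun a b : String => a < b) := by
    have h1 := PySem.List.sorted_pairwise
      (PySem.Set.union (PySem.Set.ofList core.keys) patch.keys) (fun x : String => x)
    exact (h1.and hSnodup).imp (fun h => lt_of_le_of_ne h.1 h.2)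
  -- the three group equalities
  have hAdd : (patch.keys.filter (fun f => !core.contains f)).filterMap (pvOpOf core patch)
      = (patch.keys.filter (fun f => !core.contains f)).map (pvAddOp patch) :=
    List.filterMap_eq_map_iff_forall_eq_some.mpr (by
      intro f hf
      simp only [List.mem_filter, Bool.not_eq_eq_eq_not, Bool.not_true] at hf
      have h2 : patch.contains f = true := (PySem.Dict.contains_iff_mem_keys _ _).mpr hf.1
      simp [pvOpOf, pvClassify, hf.2, h2])
  have hDrop : (core.keys.filter (fun f => !patch.contains f)).filterMap (pvOpOf core patch)
      = (core.keys.filter (fun f => !patch.contains f)).map (pvDropOp core) :=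
    List.filterMap_eq_map_iff_forall_eq_some.mpr (by
      intro f hf
      simp only [List.mem_filter, Bool.not_eq_eq_eq_not, Bool.not_true] at hf
      simp [pvOpOf, pvClassify, hf.2])
  have hFlip : (core.keys.filter (fun f => patch.contains f)).filterMap (pvOpOf core patch)
      = (core.keys.filter (fun f =>
          patch.contains f && !(core.getD f false == patch.getD f false))).map
            (pvFlipOp core patch) := by
    have h1 : (core.keys.filter (fun f => patch.contains f)).filterMap (pvOpOf core patch)
        = (core.keys.filter (fun f => patch.contains f)).filterMap
            (fun f => if !(core.getD f false == patch.getD f false) then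
              some (pvFlipOp core patch f) else none) := by
      apply List.filterMap_congr
      intro f hf
      simp only [List.mem_filter] at hf
      have h2 : core.contains f = true := (PySem.Dict.contains_iff_mem_keys _ _).mpr hf.1
      by_cases h3 : (core.getD f false == patch.getD f false) = true <;>
        simp [pvOpOf, pvClassify, h2, hf.2, h3]
    rw [h1, pvFilterMap_ite, List.filter_filter]
    exact congrArg _ (List.filter_congr (fun x _ => Bool.and_comm _ _))
  -- the permutation of the combined op list
  have hPermOps :
      ((PySem.List.sorted (PySem.Set.union (PySem.Set.ofList core.keys) patch.keys)
          (fun x => x) false).filterMap (pvOpOf core patch)).Perm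
        (((patch.keys.filter (fun f => !core.contains f)).map (pvAddOp patch) ++
          (core.keys.filter (fun f => !patch.contains f)).map (pvDropOp core)) ++
          (core.keys.filter (fun f =>
            patch.contains f && !(core.getD f false == patch.getD f false))).map
              (pvFlipOp core patch)) := by
    have p0 := List.Perm.filterMap (pvOpOf core patch)
      (PySem.List.sorted_perm (PySem.Set.union (PySem.Set.ofList core.keys) patch.keys)
        (fun x : String => x) false)
    have p1 : ((PySem.List.sorted (PySem.Set.union (PySem.Set.ofList core.keys) patch.keys)
          (fun x => x) false).filterMap (pvOpOf core patch)).Perm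
        (core.keys.filterMap (pvOpOf core patch) ++
         (patch.keys.filter (fun f => !core.contains f)).filterMap (pvOpOf core patch)) := by
      refine p0.trans ?_
      rw [hUeq, List.filterMap_append]
    have p2 : (core.keys.filterMap (pvOpOf core patch)).Perm
        ((core.keys.filter (fun f => patch.contains f)).filterMap (pvOpOf core patch) ++
         (core.keys.filter (fun f => !patch.contains f)).filterMap (pvOpOf core patch)) := by
      have := List.Perm.filterMap (pvOpOf core patch)
        (List.filter_append_perm (fun f => patch.contains f) core.keys).symm
      rwa [List.filterMap_append] at this
    rw [hFlip, hDrop] at p2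
    rw [hAdd] at p1
    refine p1.trans ?_
    refine (List.Perm.append_right _ p2).trans ?_
    -- (F ++ D) ++ A  ~  (A ++ D) ++ F
    refine List.perm_append_comm.trans ?_
    refine (List.Perm.append_left _ List.perm_append_comm).trans ?_
    rw [List.append_assoc]
  simp only [Prod.mk.injEq]
  constructor
  · -- families component
    have hempty : (PySem.Set.empty : PySem.Set String) = []  := rfl
    rw [hempty, ← PySem.Set.ofList_eq_foldl]
    apply PySem.List.sorted_eq_of_perm_of_pairwise_lt
    · -- permutation
      rw [List.perm_ext_iff_of_nodup ?_ (PySem.Set.nodup_ofList _)]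
      · intro a
        rw [PySem.Set.mem_ofList, List.mem_filterMap]
        constructor
        · intro ha
          rcases List.mem_append.mp ha with ha | ha
          · rcases List.mem_append.mp ha with ha | ha
            · obtain ⟨rfl, hne⟩ := pvMem_ite _ _ _ ha
              rw [ne_eq, List.map_eq_nil_iff] at hne
              obtain ⟨f, hf⟩ := List.exists_mem_of_ne_nil _ hne
              simp only [List.mem_filter, Bool.not_eq_eq_eq_not, Bool.not_true] at hf
              exact ⟨f, (hmemS f).mpr (Or.inr hf.1),
                (pvFamOf_add_iff core patch f).mpr
                  ⟨hf.2, (PySem.Dict.contains_iff_mem_keys _ _).mpr hf.1⟩⟩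
            · obtain ⟨rfl, hne⟩ := pvMem_ite _ _ _ ha
              rw [ne_eq, List.map_eq_nil_iff] at hne
              obtain ⟨f, hf⟩ := List.exists_mem_of_ne_nil _ hne
              simp only [List.mem_filter, Bool.not_eq_eq_eq_not, Bool.not_true] at hf
              exact ⟨f, (hmemS f).mpr (Or.inl hf.1),
                (pvFamOf_drop_iff core patch f).mpr hf.2⟩
          · obtain ⟨rfl, hne⟩ := pvMem_ite _ _ _ ha
            rw [ne_eq, List.map_eq_nil_iff] at hne
            obtain ⟨f, hf⟩ := List.exists_mem_of_ne_nil _ hne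
            simp only [List.mem_filter, Bool.and_eq_true] at hf
            exact ⟨f, (hmemS f).mpr (Or.inl hf.1),
              (pvFamOf_flip_iff core patch f).mpr
                ⟨(PySem.Dict.contains_iff_mem_keys _ _).mpr hf.1, hf.2.1,
                  by simpa using hf.2.2⟩⟩
        · rintro ⟨f, hfS, hfam⟩
          rcases pvFamOf_range core patch f a hfam with rfl | rfl | rfl
          · obtain ⟨h1, h2, h3⟩ := (pvFamOf_flip_iff core patch f).mp hfam
            have hfmem : f ∈ core.keys.filter (fun f =>
                patch.contains f && !(core.getD f false == patch.getD f false)) :=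
              List.mem_filter.mpr ⟨(PySem.Dict.contains_iff_mem_keys _ _).mp h1,
                by simp [h2, h3]⟩
            have hne : (core.keys.filter (fun f =>
                patch.contains f && !(core.getD f false == patch.getD f false))).map
                  (pvFlipOp core patch) ≠ [] := by
              intro hcon
              rw [List.map_eq_nil_iff] at hcon
              rw [hcon] at hfmem
              simp at hfmem
            exact List.mem_append.mpr (Or.inr (pvMem_ite_intro _ _ hne))
          · obtain ⟨h1, h2⟩ := (pvFamOf_add_iff core patch f).mp hfam
            have hfmem : f ∈ patch.keys.filter (fun f => !core.contains f) :=
              List.mem_filter.mpr ⟨(PySem.Dict.contains_iff_mem_keys _ _).mp h2,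
                by simp [h1]⟩
            have hne : (patch.keys.filter (fun f => !core.contains f)).map
                (pvAddOp patch) ≠ [] := by
              intro hcon
              rw [List.map_eq_nil_iff] at hcon
              rw [hcon] at hfmem
              simp at hfmem
            exact List.mem_append.mpr (Or.inl
              (List.mem_append.mpr (Or.inl (pvMem_ite_intro _ _ hne))))
          · have h2 := (pvFamOf_drop_iff core patch f).mp hfam
            have h1 : f ∈ core.keys := by
              rcases (hmemS f).mp hfS with h | h
              · exact h
              · exact absurd ((PySem.Dict.contains_iff_mem_keys _ _).mpr h)
                  (by simp [h2])
            have hfmem : f ∈ core.keys.filter (fun f => !patch.contains f) :=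
              List.mem_filter.mpr ⟨h1, by simp [h2]⟩
            have hne : (core.keys.filter (fun f => !patch.contains f)).map
                (pvDropOp core) ≠ [] := by
              intro hcon
              rw [List.map_eq_nil_iff] at hcon
              rw [hcon] at hfmem
              simp at hfmem
            exact List.mem_append.mpr (Or.inl
              (List.mem_append.mpr (Or.inr (pvMem_ite_intro _ _ hne))))
      · -- Nodup of the concatenation of conditional singletons
        by_cases h1 : ((patch.keys.filter (fun f => !core.contains f)).map
            (pvAddOp patch)).isEmpty = true <;>
        by_cases h2 : ((core.keys.filter (fun f => !patch.contains f)).map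
            (pvDropOp core)).isEmpty = true <;>
        by_cases h3 : ((core.keys.filter (fun f =>
            patch.contains f && !(core.getD f false == patch.getD f false))).map
              (pvFlipOp core patch)).isEmpty = true <;>
        simp [h1, h2, h3]
    · -- Pairwise < of the concatenation of conditional singletons
      by_cases h1 : ((patch.keys.filter (fun f => !core.contains f)).map
          (pvAddOp patch)).isEmpty = true <;>
      by_cases h2 : ((core.keys.filter (fun f => !patch.contains f)).map
          (pvDropOp core)).isEmpty = true <;>
      by_cases h3 : ((core.keys.filter (fun f =>
          patch.contains f && !(core.getD f false == patch.getD f false))).map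
            (pvFlipOp core patch)).isEmpty = true <;>
      simp [h1, h2, h3, List.pairwise_cons] <;> decide
  · -- ops component
    rw [List.nil_append]
    exact (PySem.List.sorted_eq_of_perm_of_pairwise_lt _ _ _ hPermOps
      (hSlt.filterMap (pvOpOf core patch)
        (fun a a' hlt b hb b' hb' => by
          rw [pvKeyOp core patch a b hb, pvKeyOp core patch a' b' hb']
          exact hlt))).symm

-- ===== VERDICT (by name: the statement is the Claim_ definition above) =====
theorem semantic_script_spec : Claim_equal_semantic_script := by
  intro cf pf _
  unfold Spec_semantic_script semantic_script semantic_script_alt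
  refine pvMain (pvParseFormula cf) (pvParseFormula pf) ?_ ?_ <;>
    exact PySem.Dict.nodup_keys_foldl_insert_key _
      (fun literal => if PySem.Str.startswith literal "not " then PySem.Str.slice literal (some 4) none else literal)
      (fun _ literal => !PySem.Str.startswith literal "not ")
      _ PySem.Dict.nodup_keys_empty
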